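-- pv_equiv track=rewrite | github.com/rodrigorahal/advent-of-code-2023 | 02/cube_conumdrum.py | min_cubes
-- ===== SOURCE A (Python) =====
-- def min_cubes(game):
--     mins = [0, 0, 0]
--     for round in game:
--         for n, color in round:
--             if color == "red":
--                 mins[0] = max(mins[0], n)
--             elif color == "green":
--                 mins[1] = max(mins[1], n)
--             elif color == "blue":
--                 mins[2] = max(mins[2], n)
--     return mins
-- ===== SOURCE B (Python) =====
-- def min_cubes(game):
--     return [max([0] + [n for rnd in game for n, c in rnd if c == color])
--             for color in ("red", "green", "blue")]
-- ===== Notes on version B (the rewrite author's own statement) =====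
-- stated objective: simpler
-- what changed: Replaces A's single fused pass that mutates a three-slot accumulator with three independent per-color filtered max scans (max over a flattened comprehension with 0 floor).
import Mathlib
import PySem

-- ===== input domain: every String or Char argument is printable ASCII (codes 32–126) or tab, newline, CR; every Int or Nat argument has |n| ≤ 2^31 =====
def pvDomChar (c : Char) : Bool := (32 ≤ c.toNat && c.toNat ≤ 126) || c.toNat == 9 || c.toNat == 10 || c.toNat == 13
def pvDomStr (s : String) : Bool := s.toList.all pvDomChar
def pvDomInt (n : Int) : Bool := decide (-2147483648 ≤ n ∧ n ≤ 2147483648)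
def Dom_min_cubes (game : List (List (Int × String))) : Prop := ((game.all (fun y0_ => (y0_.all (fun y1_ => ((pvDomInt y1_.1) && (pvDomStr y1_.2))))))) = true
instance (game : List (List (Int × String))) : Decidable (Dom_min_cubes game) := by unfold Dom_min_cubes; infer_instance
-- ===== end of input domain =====

-- B replaces A's single fused pass over a mutable three-slot accumulator with three
-- independent per-color filtered max scans (objective: simpler).


-- ===== PORT A =====
-- state (mins[0], mins[1], mins[2]); the if/elif chain in source order
def pvStepA (st : Int × Int × Int) (p : Int × String) : Int × Int × Int :=
  if p.2 = "red" then (max st.1 p.1, st.2.1, st.2.2)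
  else if p.2 = "green" then (st.1, max st.2.1 p.1, st.2.2)
  else if p.2 = "blue" then (st.1, st.2.1, max st.2.2 p.1)
  else st

def min_cubes (game : List (List (Int × String))) : List Int :=
  let mins := game.foldl (fun st round => round.foldl pvStepA st) (0, 0, 0)
  [mins.1, mins.2.1, mins.2.2]

-- ===== PORT B =====
-- max([0] + [n for rnd in game for n, c in rnd if c == color])
def pvColMax (game : List (List (Int × String))) (color : String) : Int :=
  (0 :: (game.flatMap (fun rnd => rnd.filterMap (fun p => if p.2 = color then some p.1 else none)))).foldl max 0

def min_cubes_alt (game : List (List (Int × String))) : List Int :=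
  ["red", "green", "blue"].map (pvColMax game)

-- ===== PRECONDITION & SPEC =====
def Spec_min_cubes (game : List (List (Int × String))) (out : List Int) : Prop := out = min_cubes_alt game
instance (game : List (List (Int × String))) (out : List Int) : Decidable (Spec_min_cubes game out) := by unfold Spec_min_cubes; infer_instance

-- ===== CLAIM (what is proved, stated in full; the proofs are below) =====
def Claim_equal_min_cubes : Prop := ∀ (game : List (List (Int × String))), Dom_min_cubes game → Spec_min_cubes game (min_cubes game)

-- ===== LEMMAS AND PROOFS =====

def pvFlat (game : List (List (Int × String))) : List (Int × String) :=
  game.flatMap (fun rnd => rnd)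

def pvSel (color : String) (l : List (Int × String)) : List Int :=
  l.filterMap (fun p => if p.2 = color then some p.1 else none)

theorem pvColMax_eq (game : List (List (Int × String))) (color : String) :
    pvColMax game color = (pvSel color (pvFlat game)).foldl max 0 := by
  simp [pvColMax, pvSel, pvFlat, - List.filterMap_flatMap, List.flatMap_def]

theorem pvFoldA_flat (game : List (List (Int × String))) (st : Int × Int × Int) :
    game.foldl (fun st round => round.foldl pvStepA st) st = (pvFlat game).foldl pvStepA st := by
  induction game generalizing st with
  | nil => simp [pvFlat]
  | cons r rest ih => simp only [pvFlat, List.flatMap_cons, List.foldl_append, List.foldl_cons]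
                      rw [ih]; rfl

theorem pvFoldA_char (l : List (Int × String)) (st : Int × Int × Int) :
    l.foldl pvStepA st =
      ((pvSel "red" l).foldl max st.1,
       (pvSel "green" l).foldl max st.2.1,
       (pvSel "blue" l).foldl max st.2.2) := by
  induction l generalizing st with
  | nil => simp [pvSel]
  | cons p rest ih =>
    obtain ⟨n, c⟩ := p
    simp only [List.foldl_cons, ih, pvSel, List.filterMap_cons]
    by_cases h1 : c = "red"
    · simp [pvStepA, h1]
    · by_cases h2 : c = "green"
      · simp [pvStepA, h2]
      · by_cases h3 : c = "blue"
        · simp [pvStepA, h3]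
        · simp [pvStepA, h1, h2, h3]

-- ===== VERDICT (by name: the statement is the Claim_ definition above) =====
theorem min_cubes_spec : Claim_equal_min_cubes := by
  intro game _
  unfold Spec_min_cubes min_cubes min_cubes_alt
  rw [pvFoldA_flat, pvFoldA_char]
  simp [List.map, pvColMax_eq]
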